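-- pv_equiv track=rewrite | github.com/SorontarX10/weekly-seo-agent | weekly_seo_agent/weekly_reporting_agent/workflow.py | _split_by_h3_blocks
-- ===== SOURCE A (Python) =====
-- def _split_by_h3_blocks(text: str) -> list[str]:
--     lines = text.splitlines()
--     blocks: list[str] = []
--     current: list[str] = []
--     for line in lines:
--         if line.startswith("### "):
--             payload = "\n".join(current).strip()
--             if payload:
--                 blocks.append(payload)
--             current = [line]
--             continue
--         current.append(line)
--     payload = "\n".join(current).strip()
--     if payload:
--         blocks.append(payload)
--     return blocks
-- ===== SOURCE B (Python) =====
-- def _split_by_h3_blocks(text: str) -> list[str]: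
--     lines = text.splitlines()
--     n = len(lines)
--     blocks: list[str] = []
--     i = 0
--     while i < n:
--         # chunk = this line plus every following non-header line
--         j = i + 1
--         while j < n and not lines[j].startswith("### "):
--             j += 1
--         payload = "\n".join(lines[i:j]).strip()
--         if payload:
--             blocks.append(payload)
--         i = j
--     return blocks
-- ===== Notes on version B (the rewrite author's own statement) =====
-- stated objective: alternative
-- what changed: Replaces the flush-on-header accumulator loop (a growing 'current' buffer flushed each time an h3 header line is seen, plus a final flush) by a two-pointer chunk scan: from each chunk start it advances to the next h3-header index, slices that whole chunk out at once, and jumps to it, so there is no carried buffer and no trailing flush.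
import Mathlib
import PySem

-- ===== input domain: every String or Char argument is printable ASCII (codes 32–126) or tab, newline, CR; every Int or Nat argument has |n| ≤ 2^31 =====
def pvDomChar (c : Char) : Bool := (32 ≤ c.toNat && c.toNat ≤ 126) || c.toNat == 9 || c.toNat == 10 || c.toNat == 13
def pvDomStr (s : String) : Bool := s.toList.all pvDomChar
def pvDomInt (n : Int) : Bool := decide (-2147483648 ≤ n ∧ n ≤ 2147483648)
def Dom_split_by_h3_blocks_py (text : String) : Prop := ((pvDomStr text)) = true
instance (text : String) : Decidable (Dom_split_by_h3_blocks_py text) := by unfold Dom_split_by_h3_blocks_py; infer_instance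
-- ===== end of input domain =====

-- B replaces A's flush-on-header accumulator loop by a two-pointer chunk scan (find next header, slice the chunk out at once); alternative decomposition, same cost.

-- ===== PORT A =====
-- A's loop: state (blocks, current); a header line flushes current and restarts it, the end flushes once more.
def pvGoA (blocks : List String) (current : List String) : List String → List String
  | [] =>
    let payload := PySem.Str.strip (PySem.Str.join "\n" current)
    if payload ≠ "" then blocks ++ [payload] else blocks
  | l :: ls =>
    if PySem.Str.startswith l "### " then
      let payload := PySem.Str.strip (PySem.Str.join "\n" current)
      pvGoA (if payload ≠ "" then blocks ++ [payload] else blocks) [l] ls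
    else
      pvGoA blocks (current ++ [l]) ls

def split_by_h3_blocks_py (text : String) : List String :=
  pvGoA [] [] (PySem.Str.splitlines text)

-- ===== PORT B =====
-- B's outer while over chunk starts; the inner while that advances j over non-header lines is the
-- takeWhile/dropWhile span of the remaining lines, lines[i:j] is the chunk.
def pvGoB : List String → List String
  | [] => []
  | l :: ls =>
    let chunk := l :: ls.takeWhile (fun s => !PySem.Str.startswith s "### ")
    let rest := ls.dropWhile (fun s => !PySem.Str.startswith s "### ")
    let payload := PySem.Str.strip (PySem.Str.join "\n" chunk)
    if payload ≠ "" then payload :: pvGoB rest else pvGoB rest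
  termination_by lines => lines.length
  decreasing_by all_goals
    simp only [List.length_cons]
    exact Nat.lt_succ_of_le (List.length_dropWhile_le _ _)

def split_by_h3_blocks_py_alt (text : String) : List String :=
  pvGoB (PySem.Str.splitlines text)

-- ===== PRECONDITION & SPEC =====
def Spec_split_by_h3_blocks_py (text : String) (out : List String) : Prop := out = split_by_h3_blocks_py_alt text
instance (text : String) (out : List String) : Decidable (Spec_split_by_h3_blocks_py text out) := by unfold Spec_split_by_h3_blocks_py; infer_instance

-- ===== CLAIM (what is proved, stated in full; the proofs are below) =====
def Claim_equal_split_by_h3_blocks_py : Prop := ∀ (text : String), Dom_split_by_h3_blocks_py text → Spec_split_by_h3_blocks_py text (split_by_h3_blocks_py text)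

-- ===== LEMMAS AND PROOFS =====

-- flush of a buffer: the one-or-zero block it contributes
def pvFlush (cur : List String) : List String :=
  let payload := PySem.Str.strip (PySem.Str.join "\n" cur)
  if payload ≠ "" then [payload] else []

def pvNH (s : String) : Bool := !PySem.Str.startswith s "### "

theorem pvIf_append (bs : List String) (p : String) :
    (if p ≠ "" then bs ++ [p] else bs) = bs ++ (if p ≠ "" then [p] else []) := by
  split_ifs <;> simp

theorem pvGoB_nil : pvGoB [] = [] := by rw [pvGoB]

theorem pvGoB_cons (l : String) (ls : List String) :
    pvGoB (l :: ls) =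
      (let payload := PySem.Str.strip (PySem.Str.join "\n" (l :: ls.takeWhile pvNH));
       if payload ≠ "" then payload :: pvGoB (ls.dropWhile pvNH) else pvGoB (ls.dropWhile pvNH)) := by
  rw [pvGoB]; rfl

theorem pvGoB_cons' (l : String) (ls : List String) :
    pvGoB (l :: ls) = pvFlush (l :: ls.takeWhile pvNH) ++ pvGoB (ls.dropWhile pvNH) := by
  rw [pvGoB_cons, pvFlush]
  by_cases hp : PySem.Str.strip (PySem.Str.join "\n" (l :: ls.takeWhile pvNH)) = "" <;> simp [hp]

theorem pvFlush_nil : pvFlush [] = [] := by decide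

theorem pvGoA_eq (lines : List String) :
    ∀ cur blocks, pvGoA blocks cur lines =
      blocks ++ pvFlush (cur ++ lines.takeWhile pvNH) ++ pvGoB (lines.dropWhile pvNH) := by
  induction lines with
  | nil => intro cur blocks; simp only [List.takeWhile_nil, List.dropWhile_nil, List.append_nil,
      pvGoB_nil, pvGoA, pvFlush, pvIf_append blocks]
  | cons l ls ih =>
    intro cur blocks
    by_cases h : PySem.Str.startswith l "### "
    · have hp : pvNH l = false := by unfold pvNH; rw [h]; rfl
      rw [pvGoA]
      simp only [h, if_true]
      rw [pvIf_append, ih [l] (blocks ++ _),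
        List.takeWhile_cons_of_neg (by simp [hp]), List.dropWhile_cons_of_neg (by simp [hp]),
        pvGoB_cons']
      simp [pvFlush, List.append_assoc]
    · have hp : pvNH l = true := by unfold pvNH; rw [Bool.eq_false_iff.mpr h]; rfl
      rw [pvGoA]
      simp only [h, if_false, Bool.false_eq_true]
      rw [ih (cur ++ [l]) blocks,
        List.takeWhile_cons_of_pos hp, List.dropWhile_cons_of_pos hp]
      simp [List.append_assoc]

theorem split_by_h3_blocks_py_spec : Claim_equal_split_by_h3_blocks_py := by
  intro text _
  show split_by_h3_blocks_py text = split_by_h3_blocks_py_alt text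
  unfold split_by_h3_blocks_py split_by_h3_blocks_py_alt
  rw [pvGoA_eq _ [] []]
  cases hcase : PySem.Str.splitlines text with
  | nil => simp [pvGoB_nil, pvFlush_nil]
  | cons l ls =>
    by_cases h : pvNH l
    · rw [List.takeWhile_cons_of_pos h, List.dropWhile_cons_of_pos h, pvGoB_cons']
      simp
    · rw [List.takeWhile_cons_of_neg (by simpa using h),
        List.dropWhile_cons_of_neg (by simpa using h)]
      simp [pvFlush_nil]
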